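-- pv_equiv track=rewrite | github.com/VoltusV5/FFMPEG-GUI | mixins/encoding_process.py | _tokenizeArgsPairs
-- ===== SOURCE A (Python) =====
-- def _tokenizeArgsPairs(args):
--     flags_with_value = {
--         "-i", "-c:v", "-c:a", "-c", "-codec:v", "-codec:a", "-b:v", "-b:a", "-r", "-crf",
--         "-preset", "-profile:v", "-level", "-pix_fmt", "-tune", "-threads", "-g", "-vf",
--         "-filter_complex", "-map", "-tag:v", "-ar", "-s", "-ss", "-to"
--     }
--     pairs = []
--     i = 0
--     while i < len(args):
--         token = args[i]
--         if token in flags_with_value and i + 1 < len(args):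
--             pairs.append((token, args[i + 1]))
--             i += 2
--         else:
--             pairs.append((token, None))
--             i += 1
--     return pairs
-- ===== SOURCE B (Python) =====
-- def _tokenizeArgsPairs(args):
--     flags_with_value = {
--         "-i", "-c:v", "-c:a", "-c", "-codec:v", "-codec:a", "-b:v", "-b:a", "-r", "-crf",
--         "-preset", "-profile:v", "-level", "-pix_fmt", "-tune", "-threads", "-g", "-vf",
--         "-filter_complex", "-map", "-tag:v", "-ar", "-s", "-ss", "-to"
--     }
--     # State machine: carry the flag that is still waiting for its value; no lookahead.
--     pairs = []
--     pending = None
--     for token in args: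
--         if pending is not None:
--             pairs.append((pending, token))
--             pending = None
--         elif token in flags_with_value:
--             pending = token
--         else:
--             pairs.append((token, None))
--     if pending is not None:
--         pairs.append((pending, None))
--     return pairs
-- ===== Notes on version B (the rewrite author's own statement) =====
-- stated objective: alternative
-- what changed: Replaced A's index-walk with lookahead (peek args[i+1], skip by 2) by a one-pass state machine that carries a 'pending' value-flag across iterations and flushes it at end of input, so each token is visited exactly once with no index arithmetic or lookahead.
import Mathlib
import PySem

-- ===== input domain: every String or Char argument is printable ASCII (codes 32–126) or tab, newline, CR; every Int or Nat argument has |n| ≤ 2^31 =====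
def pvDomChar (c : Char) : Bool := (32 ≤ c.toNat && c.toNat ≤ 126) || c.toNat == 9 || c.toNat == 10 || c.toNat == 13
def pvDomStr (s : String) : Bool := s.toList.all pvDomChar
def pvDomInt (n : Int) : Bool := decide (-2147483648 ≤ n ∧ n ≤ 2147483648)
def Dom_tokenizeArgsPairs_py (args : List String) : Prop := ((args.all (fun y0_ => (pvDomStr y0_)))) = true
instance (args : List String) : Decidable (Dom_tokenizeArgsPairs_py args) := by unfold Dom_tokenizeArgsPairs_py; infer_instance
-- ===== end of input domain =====

-- B replaces A's index walk with lookahead by a one-pass state machine carrying a pending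
-- value-flag, flushed at end of input (objective: alternative decomposition, same cost).


-- ===== PORT A =====
-- Python set literal of flags that take a value (membership test only)
def flagsWithValue : List String :=
  ["-i", "-c:v", "-c:a", "-c", "-codec:v", "-codec:a", "-b:v", "-b:a", "-r", "-crf",
   "-preset", "-profile:v", "-level", "-pix_fmt", "-tune", "-threads", "-g", "-vf",
   "-filter_complex", "-map", "-tag:v", "-ar", "-s", "-ss", "-to"]

-- the while loop of A: index i, accumulator pairs
def tokenizeLoopA (args : List String) (pairs : List (String × Option String)) (i : Nat) :
    List (String × Option String) :=
  if h : i < args.length then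
    let token := args.getD i ""
    if flagsWithValue.contains token = true ∧ i + 1 < args.length then
      tokenizeLoopA args (pairs ++ [(token, some (args.getD (i + 1) ""))]) (i + 2)
    else
      tokenizeLoopA args (pairs ++ [(token, none)]) (i + 1)
  else pairs
termination_by args.length - i
decreasing_by all_goals omega

def tokenizeArgsPairs_py (args : List String) : List (String × Option String) :=
  tokenizeLoopA args [] 0

-- ===== PORT B =====
-- B's loop body: state = (pairs so far, pending value-flag awaiting its value)
def tokenizeStepB (st : List (String × Option String) × Option String) (token : String) :
    List (String × Option String) × Option String :=
  match st.2 with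
  | some p => (st.1 ++ [(p, some token)], none)
  | none =>
    if flagsWithValue.contains token then (st.1, some token)
    else (st.1 ++ [(token, none)], none)

def tokenizeArgsPairs_py_alt (args : List String) : List (String × Option String) :=
  let st := args.foldl tokenizeStepB ([], none)
  match st.2 with
  | some p => st.1 ++ [(p, none)]
  | none => st.1

-- ===== PRECONDITION & SPEC =====
def Spec_tokenizeArgsPairs_py (args : List String) (out : List (String × Option String)) : Prop := out = tokenizeArgsPairs_py_alt args
instance (args : List String) (out : List (String × Option String)) : Decidable (Spec_tokenizeArgsPairs_py args out) := by unfold Spec_tokenizeArgsPairs_py; infer_instance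

-- ===== CLAIM (what is proved, stated in full; the proofs are below) =====
def Claim_equal_tokenizeArgsPairs_py : Prop := ∀ (args : List String), Dom_tokenizeArgsPairs_py args → Spec_tokenizeArgsPairs_py args (tokenizeArgsPairs_py args)

-- ===== LEMMAS AND PROOFS =====

-- Common reference function both ports are reduced to: a two-token lookahead recursion.
def gRef : List String → List (String × Option String)
  | [] => []
  | [t] => if flagsWithValue.contains t then [(t, none)] else (t, none) :: gRef []
  | t :: v :: rest =>
    if flagsWithValue.contains t then (t, some v) :: gRef rest
    else (t, none) :: gRef (v :: rest)

theorem gRef_nil : gRef [] = [] := rfl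

theorem gRef_single (t : String) : gRef [t] = [(t, none)] := by
  rw [gRef.eq_def]; dsimp only; split_ifs <;> simp [gRef_nil]

theorem gRef_cons2 (t v : String) (rest : List String) :
    gRef (t :: v :: rest) =
      if flagsWithValue.contains t then (t, some v) :: gRef rest
      else (t, none) :: gRef (v :: rest) := by
  rw [gRef.eq_def]

-- what B's fold-plus-flush yields from a given pending state
def runB (pend : Option String) (l : List String) : List (String × Option String) :=
  match pend with
  | none => gRef l
  | some p =>
    match l with
    | [] => [(p, none)]
    | v :: rest => (p, some v) :: gRef rest

def flushB (st : List (String × Option String) × Option String) : List (String × Option String) :=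
  match st.2 with
  | some p => st.1 ++ [(p, none)]
  | none => st.1

theorem foldB_eq (l : List String) :
    ∀ (pairs : List (String × Option String)) (pend : Option String),
      flushB (l.foldl tokenizeStepB (pairs, pend)) = pairs ++ runB pend l := by
  induction l with
  | nil =>
    intro pairs pend
    cases pend <;> simp [flushB, runB, gRef_nil]
  | cons t rest ih =>
    intro pairs pend
    cases pend with
    | some p =>
      simp only [List.foldl_cons, tokenizeStepB, ih, runB]
      simp
    | none =>
      by_cases hf : flagsWithValue.contains t
      · simp only [List.foldl_cons, tokenizeStepB, hf, if_pos, ih, runB]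
        cases rest with
        | nil => rw [gRef_single]
        | cons v r => rw [gRef_cons2, if_pos hf]
      · simp only [List.foldl_cons, tokenizeStepB, hf, ih, runB]
        cases rest with
        | nil => rw [gRef_single]; simp [gRef_nil]
        | cons v r => rw [gRef_cons2, if_neg hf]; simp

theorem tokenizeLoopA_eq (args : List String) :
    ∀ n i pairs, args.length - i ≤ n →
      tokenizeLoopA args pairs i = pairs ++ gRef (args.drop i) := by
  intro n
  induction n with
  | zero =>
    intro i pairs h
    have hi : args.length ≤ i := by omega
    rw [tokenizeLoopA]
    simp [Nat.not_lt.mpr hi, List.drop_eq_nil_of_le hi, gRef]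
  | succ n ih =>
    intro i pairs h
    rw [tokenizeLoopA]
    by_cases hi : i < args.length
    · simp only [hi, dif_pos]
      have hdrop : args.drop i = args[i] :: args.drop (i + 1) :=
        (List.getElem_cons_drop hi).symm
      have hget : args[i]? = some args[i] := List.getElem?_eq_getElem hi
      by_cases hf : flagsWithValue.contains args[i] = true
      · by_cases h1 : i + 1 < args.length
        · have hdrop2 : args.drop (i + 1) = args[i + 1] :: args.drop (i + 2) :=
            (List.getElem_cons_drop h1).symm
          have hget2 : args[i + 1]? = some args[i + 1] := List.getElem?_eq_getElem h1
          rw [if_pos ⟨by simp [List.getD, hget]; simpa using hf, h1⟩, ih (i + 2) _ (by omega),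
            hdrop, hdrop2, gRef_cons2, if_pos hf]
          simp [List.getD, hget, hget2]
        · have hnil : args.drop (i + 1) = [] := List.drop_eq_nil_of_le (by omega)
          rw [if_neg (by rintro ⟨-, hl⟩; exact h1 hl), ih (i + 1) _ (by omega),
            hdrop, hnil, gRef_single]
          simp [List.getD, hget, gRef_nil]
      · rw [if_neg (by rintro ⟨hcf, -⟩; simp [List.getD, hget] at hcf; exact hf (by simpa using hcf)),
          ih (i + 1) _ (by omega), hdrop]
        cases hd : args.drop (i + 1) with
        | nil => rw [gRef_single]; simp [List.getD, hget, gRef_nil]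
        | cons v rest => rw [gRef_cons2, if_neg hf]; simp [List.getD, hget]
    · simp [hi, List.drop_eq_nil_of_le (Nat.not_lt.mp hi), gRef]

theorem alt_eq_gRef (args : List String) : tokenizeArgsPairs_py_alt args = gRef args := by
  have h := foldB_eq args [] none
  simpa [tokenizeArgsPairs_py_alt, flushB, runB] using h

-- ===== VERDICT (by name: the statement is the Claim_ definition above) =====
theorem tokenizeArgsPairs_py_spec : Claim_equal_tokenizeArgsPairs_py := by
  intro args _
  unfold Spec_tokenizeArgsPairs_py tokenizeArgsPairs_py
  rw [alt_eq_gRef]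
  simpa using tokenizeLoopA_eq args args.length 0 [] (by omega)
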